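-- pv_equiv track=rewrite | github.com/KeenThera/SECSE | secse/utilities/ring_tool.py | ring_site_count
-- ===== SOURCE A (Python) =====
-- def ring_site_count(ring_atoms, systems):
--     site_count = [-1]  # add -1 in case no ring site
--     for ring_s in systems:
--         ring_s = set(ring_s)
--         count = 0
--         for site in ring_atoms:
--             site = set(site)
--             if ring_s.intersection(site):
--                 count += 1
--         site_count.append(count)
--     return site_count
-- ===== SOURCE B (Python) =====
-- def ring_site_count(ring_atoms, systems):
--     # Inverted index atom -> list of ring-site indices containing it;
--     # each query then unions posting lists instead of scanning all sites.
--     index = {}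
--     for i, site in enumerate(ring_atoms):
--         for atom in site:
--             index.setdefault(atom, []).append(i)
--     site_count = [-1]
--     for ring_s in systems:
--         hit = set()
--         for atom in ring_s:
--             hit.update(index.get(atom, ()))
--         site_count.append(len(hit))
--     return site_count
-- ===== Notes on version B (the rewrite author's own statement) =====
-- stated objective: faster
-- what changed: Replaced the per-system scan over all ring sites (building a set per site and intersecting) by a one-pass inverted index atom->site indices; each system then just unions the posting lists of its atoms and counts the distinct indices.
import Mathlib
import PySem

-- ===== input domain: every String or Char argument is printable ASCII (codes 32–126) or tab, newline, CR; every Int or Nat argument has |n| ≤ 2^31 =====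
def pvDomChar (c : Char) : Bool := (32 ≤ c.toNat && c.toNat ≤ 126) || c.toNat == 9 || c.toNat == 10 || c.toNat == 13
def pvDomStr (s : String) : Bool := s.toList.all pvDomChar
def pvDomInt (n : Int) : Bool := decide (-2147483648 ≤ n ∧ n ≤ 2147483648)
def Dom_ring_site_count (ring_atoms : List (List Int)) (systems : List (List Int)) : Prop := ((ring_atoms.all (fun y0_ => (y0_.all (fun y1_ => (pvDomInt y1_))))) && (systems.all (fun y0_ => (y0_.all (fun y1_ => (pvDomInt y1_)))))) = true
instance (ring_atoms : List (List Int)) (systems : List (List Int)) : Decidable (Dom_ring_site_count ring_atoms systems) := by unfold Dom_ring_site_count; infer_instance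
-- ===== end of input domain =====

-- B replaces A's per-system scan over all ring sites by an inverted index atom -> site indices
-- built once; each system unions the posting lists of its atoms and counts the distinct indices (objective: faster).


-- ===== PORT A =====
def ring_site_count (ring_atoms : List (List Int)) (systems : List (List Int)) : List Int :=
  systems.foldl (fun site_count ring_s0 =>
    let ring_s := PySem.Set.ofList ring_s0
    let count := ring_atoms.foldl (fun count site0 =>
      let site := PySem.Set.ofList site0
      if PySem.Set.inter ring_s site ≠ [] then count + 1 else count) (0 : Int)
    site_count ++ [count]) [-1]

-- ===== PORT B =====
-- index = {}; for i, site in enumerate(ring_atoms): for atom in site: index.setdefault(atom, []).append(i)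
def pvIndex (ring_atoms : List (List Int)) : PySem.Dict Int (List Int) :=
  (PySem.List.enumerate ring_atoms 0).foldl
    (fun d p => p.2.foldl (fun d atom => d.modify atom [] (· ++ [p.1])) d)
    PySem.Dict.empty

def ring_site_count_alt (ring_atoms : List (List Int)) (systems : List (List Int)) : List Int :=
  let index := pvIndex ring_atoms
  systems.foldl (fun site_count ring_s =>
    let hit : PySem.Set Int :=
      ring_s.foldl (fun h atom => PySem.Set.update h (index.getD atom [])) PySem.Set.empty
    site_count ++ [PySem.Set.len hit]) [-1]

-- ===== PRECONDITION & SPEC =====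
def Spec_ring_site_count (ring_atoms : List (List Int)) (systems : List (List Int)) (out : List Int) : Prop := out = ring_site_count_alt ring_atoms systems
instance (ring_atoms : List (List Int)) (systems : List (List Int)) (out : List Int) : Decidable (Spec_ring_site_count ring_atoms systems out) := by unfold Spec_ring_site_count; infer_instance

-- ===== CLAIM (what is proved, stated in full; the proofs are below) =====
def Claim_equal_ring_site_count : Prop := ∀ (ring_atoms : List (List Int)) (systems : List (List Int)), Dom_ring_site_count ring_atoms systems → Spec_ring_site_count ring_atoms systems (ring_site_count ring_atoms systems)

-- ===== LEMMAS AND PROOFS =====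

-- membership in a posting list of the inverted index
theorem pv_mem_index (ring_atoms : List (List Int)) (a i : Int) :
    i ∈ (pvIndex ring_atoms).getD a [] ↔
      ∃ p ∈ PySem.List.enumerate ring_atoms 0, p.1 = i ∧ a ∈ p.2 := by
  have hflat : pvIndex ring_atoms =
      ((PySem.List.enumerate ring_atoms 0).flatMap (fun p => p.2.map (fun atom => (atom, p.1)))).foldl
        (fun d q => d.modify q.1 [] (· ++ [q.2])) PySem.Dict.empty := by
    rw [List.foldl_flatMap]
    unfold pvIndex
    simp [List.foldl_map]
  rw [hflat, PySem.Dict.getD_foldl_modify_append]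
  simp only [PySem.Dict.getD_empty, List.nil_append, List.mem_map, List.mem_filter,
    List.mem_flatMap, beq_iff_eq]
  constructor
  · rintro ⟨q, ⟨⟨p, hp, a', ha', rfl⟩, hqa⟩, hqi⟩
    exact ⟨p, hp, hqi, hqa ▸ ha'⟩
  · rintro ⟨p, hp, hpi, ha⟩
    exact ⟨(a, p.1), ⟨⟨p, hp, a, ha, rfl⟩, rfl⟩, hpi⟩

-- membership in the union-of-posting-lists accumulator
theorem pv_mem_hit (index : PySem.Dict Int (List Int)) (s : List Int) (h0 : PySem.Set Int) (i : Int) :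
    i ∈ s.foldl (fun h atom => PySem.Set.update h (index.getD atom [])) h0 ↔
      i ∈ h0 ∨ ∃ a ∈ s, i ∈ index.getD a [] := by
  induction s generalizing h0 with
  | nil => simp
  | cons x xs ih =>
    simp only [List.foldl_cons, ih, PySem.Set.mem_update, List.mem_cons]
    constructor
    · rintro (⟨h | h⟩ | ⟨a, ha, hi⟩)
      · exact Or.inl h
      · exact Or.inr ⟨x, Or.inl rfl, h⟩
      · exact Or.inr ⟨a, Or.inr ha, hi⟩
    · rintro (h | ⟨a, (rfl | ha), hi⟩)
      · exact Or.inl (Or.inl h)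
      · exact Or.inl (Or.inr hi)
      · exact Or.inr ⟨a, ha, hi⟩

theorem pv_nodup_hit (index : PySem.Dict Int (List Int)) (s : List Int) (h0 : PySem.Set Int)
    (hn : h0.Nodup) :
    (s.foldl (fun h atom => PySem.Set.update h (index.getD atom [])) h0).Nodup := by
  induction s generalizing h0 with
  | nil => exact hn
  | cons x xs ih =>
    exact ih _ (PySem.Set.nodup_update h0 _ hn)

-- per-system agreement of the two counts
theorem pv_count_eq (ring_atoms : List (List Int)) (s : List Int) :
    (ring_atoms.foldl (fun count site0 =>
      if PySem.Set.inter (PySem.Set.ofList s) (PySem.Set.ofList site0) ≠ [] then count + 1 else count)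
      (0 : Int))
    = PySem.Set.len
        (s.foldl (fun h atom => PySem.Set.update h ((pvIndex ring_atoms).getD atom [])) PySem.Set.empty) := by
  have hif : (fun (count : Int) site0 =>
      if PySem.Set.inter (PySem.Set.ofList s) (PySem.Set.ofList site0) ≠ [] then count + 1 else count)
      = fun (count : Int) site0 =>
      if (decide (PySem.Set.inter (PySem.Set.ofList s) (PySem.Set.ofList site0) ≠ [])) = true
      then count + 1 else count := by
    funext c site0; simp
  rw [hif, PySem.List.foldl_count_if, zero_add]
  set hit := s.foldl (fun h atom => PySem.Set.update h ((pvIndex ring_atoms).getD atom [])) PySem.Set.empty with hhit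
  have hlen : PySem.Set.len hit = (hit.length : Int) := rfl
  rw [hlen]
  congr 1
  -- the comparison list: first components of the hit entries of the enumeration
  set T := ((PySem.List.enumerate ring_atoms 0).filter
      (fun p => decide (∃ a ∈ s, a ∈ p.2))).map (fun p => p.1) with hT
  have hTnodup : T.Nodup := by
    have h1 : ((PySem.List.enumerate ring_atoms 0).filter
        (fun p => decide (∃ a ∈ s, a ∈ p.2))).Pairwise (fun p q => p.1 < q.1) :=
      List.Pairwise.filter _ (PySem.List.pairwise_lt_enumerate ring_atoms 0)
    have h2 : T.Pairwise (· < ·) := by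
      rw [hT, List.pairwise_map]; exact h1
    exact h2.imp ne_of_lt
  have hhitnodup : hit.Nodup := pv_nodup_hit _ _ _ List.nodup_nil
  have hmem : ∀ i, i ∈ hit ↔ i ∈ T := by
    intro i
    rw [hhit, pv_mem_hit]
    simp only [PySem.Set.empty, List.not_mem_nil, false_or, hT, List.mem_map, List.mem_filter,
      decide_eq_true_eq]
    constructor
    · rintro ⟨a, ha, hi⟩
      rcases (pv_mem_index ring_atoms a i).mp hi with ⟨p, hp, hpi, hap⟩
      exact ⟨p, ⟨hp, a, ha, hap⟩, hpi⟩
    · rintro ⟨p, ⟨hp, a, ha, hap⟩, hpi⟩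
      exact ⟨a, ha, (pv_mem_index ring_atoms a i).mpr ⟨p, hp, hpi, hap⟩⟩
  have hperm : hit.Perm T := (List.perm_ext_iff_of_nodup hhitnodup hTnodup).mpr hmem
  rw [hperm.length_eq, hT, List.length_map, ← List.countP_eq_length_filter]
  have hra : ring_atoms.countP
      (fun site0 => decide (PySem.Set.inter (PySem.Set.ofList s) (PySem.Set.ofList site0) ≠ []))
      = (PySem.List.enumerate ring_atoms 0).countP
      (fun p => decide (PySem.Set.inter (PySem.Set.ofList s) (PySem.Set.ofList p.2) ≠ [])) := by
    conv_lhs => rw [← PySem.List.map_snd_enumerate ring_atoms 0]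
    rw [List.countP_map]
    rfl
  rw [hra]
  apply List.countP_congr
  intro p _
  simp only [decide_eq_true_eq, ne_eq]
  constructor
  · intro h
    rcases List.exists_mem_of_ne_nil _ h with ⟨x, hx⟩
    rw [PySem.Set.mem_inter] at hx
    exact ⟨x, (PySem.Set.mem_ofList _ _).mp hx.1, (PySem.Set.mem_ofList _ _).mp hx.2⟩
  · rintro ⟨a, ha, hap⟩
    exact List.ne_nil_of_mem ((PySem.Set.mem_inter _ _ _).mpr
      ⟨(PySem.Set.mem_ofList _ _).mpr ha, (PySem.Set.mem_ofList _ _).mpr hap⟩)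

-- ===== VERDICT (by name: the statement is the Claim_ definition above) =====
theorem ring_site_count_spec : Claim_equal_ring_site_count := by
  intro ring_atoms systems _
  unfold Spec_ring_site_count ring_site_count ring_site_count_alt
  simp only [PySem.List.foldl_append_singleton_eq_map]
  congr 1
  apply List.map_congr_left
  intro s _
  exact pv_count_eq ring_atoms s
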